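-- pv_equiv track=rewrite | github.com/tranquilite/challenges | adventofcode/2022/03.py | day3_part1
-- ===== SOURCE A (Python) =====
-- PRIORITIES = [*'abcdefghijklmnopqrstuvwxyz']
--
-- def day3_part1(backpacks: list) -> int:
--     score = 0
--     for backpack in backpacks:
--         size, found = len(backpack) // 2, []
--         comp1, comp2 = backpack[:size], backpack[size:]  # compartments
--
--         for i in range(len(comp1)):
--             if comp1[i] in comp2 \
--               and not comp1[i] in found \
--               and comp1[i] in PRIORITIES:
--                 score += PRIORITIES.index(comp1[i]) + 1
--                 found.append(comp1[i])
--
--     return(score)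
-- ===== SOURCE B (Python) =====
-- LOWER = 'abcdefghijklmnopqrstuvwxyz'
--
-- def day3_part1(backpacks: list) -> int:
--     score = 0
--     for backpack in backpacks:
--         size = len(backpack) // 2
--         m1 = 0
--         for c in backpack[:size]:
--             if c in LOWER:
--                 m1 |= 1 << (ord(c) - 97)
--         m2 = 0
--         for c in backpack[size:]:
--             if c in LOWER:
--                 m2 |= 1 << (ord(c) - 97)
--         shared = m1 & m2
--         for i in range(26):
--             if (shared >> i) & 1:
--                 score += i + 1
--     return score
-- ===== Notes on version B (the rewrite author's own statement) =====
-- stated objective: alternative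
-- what changed: Replaces A's per-character scans of the second compartment and of the growing 'found' dedup list (plus PRIORITIES.index) by two 26-bit bitmasks built in one pass each, intersected with '&', and summed by a fixed 26-step bit scan.
import Mathlib
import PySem

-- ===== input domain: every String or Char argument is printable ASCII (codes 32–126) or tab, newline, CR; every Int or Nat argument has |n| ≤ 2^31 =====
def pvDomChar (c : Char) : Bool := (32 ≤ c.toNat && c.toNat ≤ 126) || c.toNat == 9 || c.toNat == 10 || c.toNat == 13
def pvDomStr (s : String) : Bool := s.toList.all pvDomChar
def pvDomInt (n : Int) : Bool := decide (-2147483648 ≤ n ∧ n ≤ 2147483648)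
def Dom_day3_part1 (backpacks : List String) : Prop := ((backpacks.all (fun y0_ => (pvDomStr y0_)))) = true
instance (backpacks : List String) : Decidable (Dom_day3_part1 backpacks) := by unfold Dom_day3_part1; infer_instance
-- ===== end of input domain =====

-- B replaces A's inner scans (membership in comp2 and in the growing 'found' list, plus
-- PRIORITIES.index) by two bitmasks, a bitwise AND, and a fixed 26-step bit scan (alternative
-- algorithm, similar measured cost).

-- ===== PORT A =====
-- PRIORITIES = [*'abcdefghijklmnopqrstuvwxyz']
def pvPriorities : List Char :=
  ['a','b','c','d','e','f','g','h','i','j','k','l','m','n','o','p','q','r','s','t','u','v','w','x','y','z']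

-- inner 'for i in range(len(comp1))' loop, as structural recursion over comp1's elements
-- (comp1[i] for i = 0..len-1 are exactly comp1's elements in order); .index is
-- PySem.List.index?, its .getD 0 is unreachable since the guard requires membership.
def day3_innerA (comp2 : List Char) : List Char → List Char → Int → Int
  | [], _, score => score
  | c :: rest, found, score =>
    if c ∈ comp2 ∧ c ∉ found ∧ c ∈ pvPriorities then
      day3_innerA comp2 rest (found ++ [c]) (score + (((PySem.List.index? pvPriorities c).getD 0 : Nat) + 1))
    else
      day3_innerA comp2 rest found score

def day3_part1 (backpacks : List String) : Int :=
  backpacks.foldl (fun score backpack =>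
    let chars := backpack.toList
    let size := chars.length / 2          -- len(backpack) // 2, exact: length ≥ 0
    let comp1 := chars.take size          -- backpack[:size], nonneg bound
    let comp2 := chars.drop size          -- backpack[size:]
    day3_innerA comp2 comp1 [] score) 0

-- ===== PORT B =====
def pvLowmask (l : List Char) : Nat :=
  l.foldl (fun m c => if c ∈ pvPriorities then m ||| (1 <<< (c.toNat - 97)) else m) 0

def day3_part1_alt (backpacks : List String) : Int :=
  backpacks.foldl (fun score backpack =>
    let chars := backpack.toList
    let size := chars.length / 2
    let shared := pvLowmask (chars.take size) &&& pvLowmask (chars.drop size)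
    (List.range 26).foldl (fun s i => if (shared >>> i) &&& 1 = 1 then s + ((i : Int) + 1) else s) score) 0

-- ===== PRECONDITION & SPEC =====
def Spec_day3_part1 (backpacks : List String) (out : Int) : Prop := out = day3_part1_alt backpacks
instance (backpacks : List String) (out : Int) : Decidable (Spec_day3_part1 backpacks out) := by unfold Spec_day3_part1; infer_instance

-- ===== CLAIM (what is proved, stated in full; the proofs are below) =====
def Claim_equal_day3_part1 : Prop := ∀ (backpacks : List String), Dom_day3_part1 backpacks → Spec_day3_part1 backpacks (day3_part1 backpacks)

-- ===== LEMMAS AND PROOFS =====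

-- the letter with index i (i < 26)
def pvLetter (i : Nat) : Char := pvPriorities.getD i 'a'

-- common intermediate value: sum over the 26 letters of (i+1) when letter i is in both
-- compartments and not yet 'found'
def pvT (c1 c2 found : List Char) : Int :=
  ∑ i ∈ Finset.range 26,
    (if pvLetter i ∈ c1 ∧ pvLetter i ∈ c2 ∧ pvLetter i ∉ found then (i : Int) + 1 else 0)

-- facts about the 26 letters, checked by evaluation (Bool forms keep the kernel iterative)
set_option maxRecDepth 2000 in
lemma pv_index_eq_b :
    pvPriorities.all (fun c => PySem.List.index? pvPriorities c == some (c.toNat - 97)) = true := by decide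
set_option maxRecDepth 2000 in
lemma pv_code_lt_b : pvPriorities.all (fun c => decide (c.toNat - 97 < 26)) = true := by decide
set_option maxRecDepth 2000 in
lemma pv_code_iff_b :
    (List.range 26).all (fun i => pvPriorities.all
      (fun c => decide ((c.toNat - 97 = i) ↔ (c = pvLetter i)))) = true := by decide
set_option maxRecDepth 2000 in
lemma pv_letter_mem_b : (List.range 26).all (fun i => pvPriorities.contains (pvLetter i)) = true := by decide

lemma pv_index_eq : ∀ c ∈ pvPriorities, PySem.List.index? pvPriorities c = some (c.toNat - 97) := by
  have h := pv_index_eq_b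
  simp only [List.all_eq_true, beq_iff_eq] at h
  exact h
lemma pv_code_lt : ∀ c ∈ pvPriorities, c.toNat - 97 < 26 := by
  have h := pv_code_lt_b
  simp only [List.all_eq_true, decide_eq_true_eq] at h
  exact h
lemma pv_code_iff : ∀ i ∈ List.range 26, ∀ c ∈ pvPriorities, (c.toNat - 97 = i ↔ c = pvLetter i) := by
  have h := pv_code_iff_b
  simp only [List.all_eq_true, decide_eq_true_eq] at h
  exact h
lemma pv_letter_mem : ∀ i ∈ List.range 26, pvLetter i ∈ pvPriorities := by
  have h := pv_letter_mem_b
  simp only [List.all_eq_true, List.contains_iff_mem] at h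
  exact h

lemma pv_code_iff' {i : Nat} (hi : i < 26) {c : Char} (hc : c ∈ pvPriorities) :
    c.toNat - 97 = i ↔ c = pvLetter i :=
  pv_code_iff i (List.mem_range.mpr hi) c hc

-- mask characterization
lemma pvLowmask_testBit (l : List Char) (i : Nat) :
    (pvLowmask l).testBit i = true ↔ ∃ c ∈ l, c ∈ pvPriorities ∧ c.toNat - 97 = i := by
  have key : ∀ (l : List Char) (acc : Nat),
      (l.foldl (fun m c => if c ∈ pvPriorities then m ||| (1 <<< (c.toNat - 97)) else m) acc).testBit i = true
        ↔ acc.testBit i = true ∨ ∃ c ∈ l, c ∈ pvPriorities ∧ c.toNat - 97 = i := by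
    intro l
    induction l with
    | nil => simp
    | cons c rest ih =>
      intro acc
      simp only [List.foldl_cons, ih]
      by_cases hc : c ∈ pvPriorities
      · simp only [if_pos hc, Nat.testBit_or, Nat.one_shiftLeft, Nat.testBit_two_pow,
          Bool.or_eq_true, decide_eq_true_eq]
        constructor
        · rintro (⟨h | h⟩ | h)
          · exact Or.inl h
          · exact Or.inr ⟨c, List.mem_cons_self .., hc, h⟩
          · obtain ⟨d, hd, h1, h2⟩ := h
            exact Or.inr ⟨d, List.mem_cons_of_mem _ hd, h1, h2⟩
        · rintro (h | ⟨d, hd, h1, h2⟩)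
          · exact Or.inl (Or.inl h)
          · rcases List.mem_cons.mp hd with rfl | hd
            · exact Or.inl (Or.inr h2)
            · exact Or.inr ⟨d, hd, h1, h2⟩
      · simp only [if_neg hc]
        constructor
        · rintro (h | ⟨d, hd, h1, h2⟩)
          · exact Or.inl h
          · exact Or.inr ⟨d, List.mem_cons_of_mem _ hd, h1, h2⟩
        · rintro (h | ⟨d, hd, h1, h2⟩)
          · exact Or.inl h
          · rcases List.mem_cons.mp hd with rfl | hd
            · exact absurd h1 hc
            · exact Or.inr ⟨d, hd, h1, h2⟩
  rw [pvLowmask, key]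
  simp

lemma pvLowmask_testBit_letter (l : List Char) {i : Nat} (hi : i < 26) :
    (pvLowmask l).testBit i = true ↔ pvLetter i ∈ l := by
  rw [pvLowmask_testBit]
  constructor
  · rintro ⟨c, hc, hp, hcode⟩
    rwa [(pv_code_iff' hi hp).mp hcode] at hc
  · intro h
    exact ⟨pvLetter i, h, pv_letter_mem i (List.mem_range.mpr hi),
      (pv_code_iff' hi (pv_letter_mem i (List.mem_range.mpr hi))).mpr rfl⟩

-- A's inner loop computes pvT
lemma day3_innerA_eq (c2 : List Char) :
    ∀ (c1 found : List Char) (s : Int), day3_innerA c2 c1 found s = s + pvT c1 c2 found := by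
  intro c1
  induction c1 with
  | nil =>
    intro found s
    simp [day3_innerA, pvT]
  | cons c rest ih =>
    intro found s
    by_cases h : c ∈ c2 ∧ c ∉ found ∧ c ∈ pvPriorities
    · obtain ⟨h2, hf, hp⟩ := h
      have hidx := pv_index_eq c hp
      have hlt := pv_code_lt c hp
      rw [day3_innerA, if_pos ⟨h2, hf, hp⟩, ih, hidx]
      have hT : pvT (c :: rest) c2 found
          = pvT rest c2 (found ++ [c]) + ((c.toNat - 97 : Nat) + 1) := by
        unfold pvT
        have : ∀ i ∈ Finset.range 26,
            (if pvLetter i ∈ c :: rest ∧ pvLetter i ∈ c2 ∧ pvLetter i ∉ found then (i : Int) + 1 else 0)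
            = (if pvLetter i ∈ rest ∧ pvLetter i ∈ c2 ∧ pvLetter i ∉ found ++ [c] then (i : Int) + 1 else 0)
              + (if i = c.toNat - 97 then (i : Int) + 1 else 0) := by
          intro i hi
          have hi26 := Finset.mem_range.mp hi
          by_cases hic : pvLetter i = c
          · have : i = c.toNat - 97 := by
              have := (pv_code_iff' hi26 hp).mpr hic.symm
              omega
            subst this
            rw [if_pos rfl, hic, if_pos ⟨List.mem_cons_self .., h2, hf⟩]
            rw [if_neg (by simp)]
            simp
          · have hne : i ≠ c.toNat - 97 := fun he => hic ((pv_code_iff' hi26 hp).mp he.symm).symm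
            rw [if_neg hne, add_zero]
            have m1 : pvLetter i ∈ c :: rest ↔ pvLetter i ∈ rest := by
              simp [List.mem_cons, hic]
            have m2 : pvLetter i ∉ found ++ [c] ↔ pvLetter i ∉ found := by
              simp [List.mem_append, hic]
            simp only [m1, m2]
        rw [Finset.sum_congr rfl this, Finset.sum_add_distrib,
          Finset.sum_ite_eq' (Finset.range 26) (c.toNat - 97) (fun i => (i : Int) + 1),
          if_pos (Finset.mem_range.mpr hlt)]
      rw [hT]
      simp only [Option.getD_some]
      ring
    · rw [day3_innerA, if_neg h, ih]
      have hT : pvT (c :: rest) c2 found = pvT rest c2 found := by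
        unfold pvT
        apply Finset.sum_congr rfl
        intro i hi
        have hi26 := Finset.mem_range.mp hi
        by_cases hic : pvLetter i = c
        · have hp : c ∈ pvPriorities := hic ▸ pv_letter_mem i (List.mem_range.mpr hi26)
          have hbad : ¬ (c ∈ c2 ∧ c ∉ found) := fun ⟨a, b⟩ => h ⟨a, b, hp⟩
          rw [hic]
          rw [if_neg (by tauto), if_neg (by tauto)]
        · have : pvLetter i ∈ c :: rest ↔ pvLetter i ∈ rest := by simp [List.mem_cons, hic]
          simp only [this]
      rw [hT]

-- B's scan of the 26 bits computes the corresponding sum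
lemma pv_bitscan (shared : Nat) (s : Int) (n : Nat) :
    (List.range n).foldl (fun s i => if (shared >>> i) &&& 1 = 1 then s + ((i : Int) + 1) else s) s
      = s + ∑ i ∈ Finset.range n, (if (shared >>> i) &&& 1 = 1 then (i : Int) + 1 else 0) := by
  induction n with
  | zero => simp
  | succ n ih =>
    rw [List.range_succ, List.foldl_append, ih, Finset.sum_range_succ, List.foldl_cons,
      List.foldl_nil]
    by_cases h : (shared >>> n) &&& 1 = 1
    · rw [if_pos h, if_pos h]; ring
    · rw [if_neg h, if_neg h]; ring

lemma pv_bit_eq_testBit (m i : Nat) : ((m >>> i) &&& 1 = 1) ↔ m.testBit i = true := by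
  rw [Nat.and_one_is_mod, Nat.shiftRight_eq_div_pow, Nat.testBit_eq_decide_div_mod_eq]
  simp

-- per-backpack agreement
lemma pv_step_eq (s : Int) (bp : String) :
    day3_innerA (bp.toList.drop (bp.toList.length / 2)) (bp.toList.take (bp.toList.length / 2)) [] s
      = (List.range 26).foldl
          (fun t i => if ((pvLowmask (bp.toList.take (bp.toList.length / 2)) &&&
              pvLowmask (bp.toList.drop (bp.toList.length / 2))) >>> i) &&& 1 = 1
            then t + ((i : Int) + 1) else t) s := by
  set c1 := bp.toList.take (bp.toList.length / 2)
  set c2 := bp.toList.drop (bp.toList.length / 2)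
  rw [day3_innerA_eq, pv_bitscan]
  congr 1
  unfold pvT
  apply Finset.sum_congr rfl
  intro i hi
  have hi26 := Finset.mem_range.mp hi
  congr 1
  rw [eq_iff_iff, pv_bit_eq_testBit, Nat.testBit_and, Bool.and_eq_true,
    pvLowmask_testBit_letter _ hi26, pvLowmask_testBit_letter _ hi26]
  simp

lemma pv_eq (backpacks : List String) : day3_part1 backpacks = day3_part1_alt backpacks := by
  unfold day3_part1 day3_part1_alt
  induction backpacks using List.reverseRecOn with
  | nil => rfl
  | append_singleton l bp ih =>
    simp only [List.foldl_append, List.foldl_cons, List.foldl_nil]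
    rw [ih, pv_step_eq]

-- ===== VERDICT (by name: the statement is the Claim_ definition above) =====
theorem day3_part1_spec : Claim_equal_day3_part1 := by
  intro backpacks _
  exact pv_eq backpacks
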